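-- pv_equiv track=rewrite | github.com/Saw-Baw-Mu-Thaw/it-prop-firm-project | UI/src/views/StrategyBuilderView.py | _selection_offset_to_index
-- ===== SOURCE A (Python) =====
-- def _selection_offset_to_index(value: str, offset: int | None) -> int:
--     if offset is None or offset < 0:
--         return len(value)
--
--     if "\r\n" not in value:
--         return min(offset, len(value))
--
--     # Flet selection offsets are LF-based, but Windows text can be stored as CRLF.
--     logical = 0
--     i = 0
--     target = max(0, offset)
--     while i < len(value) and logical < target:
--         if value[i] == "\r" and i + 1 < len(value) and value[i + 1] == "\n":
--             i += 2
--         else: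
--             i += 1
--         logical += 1
--
--     return i
-- ===== SOURCE B (Python) =====
-- def _selection_offset_to_index(value: str, offset: int | None) -> int:
--     if offset is None or offset < 0:
--         return len(value)
--
--     # Jump from CRLF to CRLF instead of inspecting every character.
--     i = 0
--     remaining = offset
--     while remaining > 0 and i < len(value):
--         nxt = value.find("\r\n", i)
--         if nxt == -1 or nxt - i >= remaining:
--             return min(i + remaining, len(value))
--         remaining -= nxt - i + 1
--         i = nxt + 2
--     return i
-- ===== Notes on version B (the rewrite author's own statement) =====
-- stated objective: alternative
-- what changed: Replaces the per-character scan (and the separate no-CRLF fast path) with a single loop that jumps between CRLF occurrences found by str.find, doing run-length arithmetic per CRLF instead of per character.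
import Mathlib
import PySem

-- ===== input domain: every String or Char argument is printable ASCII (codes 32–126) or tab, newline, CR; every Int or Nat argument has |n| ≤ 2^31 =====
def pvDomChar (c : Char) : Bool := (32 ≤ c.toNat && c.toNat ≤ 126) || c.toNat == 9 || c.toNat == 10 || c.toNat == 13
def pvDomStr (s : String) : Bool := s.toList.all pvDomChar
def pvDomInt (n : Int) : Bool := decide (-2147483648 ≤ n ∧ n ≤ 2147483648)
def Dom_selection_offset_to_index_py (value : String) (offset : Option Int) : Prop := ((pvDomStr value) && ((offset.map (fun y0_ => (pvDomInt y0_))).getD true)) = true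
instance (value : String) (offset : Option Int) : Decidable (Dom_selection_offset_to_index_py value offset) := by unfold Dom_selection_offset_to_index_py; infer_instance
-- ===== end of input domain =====

-- B replaces A's per-character scan (with its separate no-CRLF fast path) by one loop that
-- jumps between CRLF occurrences located with str.find; same cost class, different decomposition.


-- ===== PORT A =====
-- A's while loop: walk the characters one by one; a "\r\n" pair advances the physical
-- index i by 2, any other character by 1; each step consumes one logical unit.
-- The loop is a recursion over the unread suffix of the string (same state: i, logical).
def aLoop : List Char → Nat → Int → Int → Int
  | [], i, _, _ => (i : Int)
  | c :: rest, i, logical, target =>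
    if logical < target then
      if c = '\r' ∧ rest.head? = some '\n' then
        aLoop rest.tail (i + 2) (logical + 1) target
      else
        aLoop rest (i + 1) (logical + 1) target
    else (i : Int)
  termination_by cs _ _ _ => cs.length
  decreasing_by
    · simp only [List.length_cons, List.length_tail]; omega
    · simp

def selection_offset_to_index_py (value : String) (offset : Option Int) : Int :=
  match offset with
  | none => (PySem.Str.len value : Int)
  | some off =>
    if off < 0 then (PySem.Str.len value : Int)
    else if ¬ (PySem.Str.isIn "\r\n" value = true) then min off (PySem.Str.len value : Int)
    else aLoop value.toList 0 0 (max 0 off)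

-- ===== PORT B =====
-- B's while loop: i is the physical index (a nonnegative Python int, held as a Nat),
-- remaining the logical budget; each iteration jumps to the next "\r\n" via str.find.
def bLoop (s : List Char) (i : Nat) (remaining : Int) : Int :=
  if 0 < remaining ∧ (i : Int) < s.length then
    let nxt := PySem.Chars.findFrom s ['\r', '\n'] (i : Int) none
    if nxt = -1 ∨ remaining ≤ nxt - (i : Int) then
      min ((i : Int) + remaining) (s.length : Int)
    else
      bLoop s (nxt.toNat + 2) (remaining - (nxt - (i : Int) + 1))
  else (i : Int)
  termination_by s.length - i
  decreasing_by
    rename_i hcond hne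
    have hi : (i : Int) ≤ (s.length : Int) := le_of_lt hcond.2
    have hk : i ≤ s.length := by exact_mod_cast hi
    have hneq : PySem.Chars.findFrom s ['\r', '\n'] (i : Int) none ≠ -1 := by
      intro h; exact hne (Or.inl h)
    have hspec := PySem.Chars.findFrom_natCast_spec s ['\r', '\n'] i hk hneq
    omega

def selection_offset_to_index_py_alt (value : String) (offset : Option Int) : Int :=
  match offset with
  | none => (PySem.Str.len value : Int)
  | some off =>
    if off < 0 then (PySem.Str.len value : Int)
    else bLoop value.toList 0 off

-- ===== PRECONDITION & SPEC =====
def Spec_selection_offset_to_index_py (value : String) (offset : Option Int) (out : Int) : Prop := out = selection_offset_to_index_py_alt value offset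
instance (value : String) (offset : Option Int) (out : Int) : Decidable (Spec_selection_offset_to_index_py value offset out) := by unfold Spec_selection_offset_to_index_py; infer_instance

-- ===== CLAIM (what is proved, stated in full; the proofs are below) =====
def Claim_equal_selection_offset_to_index_py : Prop := ∀ (value : String) (offset : Option Int), Dom_selection_offset_to_index_py value offset → Spec_selection_offset_to_index_py value offset (selection_offset_to_index_py value offset)

-- ===== LEMMAS AND PROOFS =====

-- The `logical` counter only matters through `target - logical`.
theorem aLoop_shift_aux : ∀ (n : Nat) (cs : List Char), cs.length ≤ n → ∀ (i : Nat) (l t : Int),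
    aLoop cs i l t = aLoop cs i 0 (t - l) := by
  intro n
  induction n with
  | zero =>
    intro cs h i l t
    have : cs = [] := List.eq_nil_of_length_eq_zero (Nat.le_zero.mp h)
    subst this; simp [aLoop]
  | succ n ih =>
    intro cs h i l t
    match cs with
    | [] => simp [aLoop]
    | c :: rest =>
      simp only [aLoop]
      by_cases hlt : l < t
      · rw [if_pos hlt, if_pos (show (0:Int) < t - l by omega)]
        simp only [List.length_cons] at h
        by_cases hc : c = '\r' ∧ rest.head? = some '\n'
        · rw [if_pos hc, if_pos hc,
            ih rest.tail (by simp only [List.length_tail]; omega) (i+2) (l+1) t,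
            ih rest.tail (by simp only [List.length_tail]; omega) (i+2) (0+1) (t-l)]
          congr 1; omega
        · rw [if_neg hc, if_neg hc, ih rest (by omega) (i+1) (l+1) t,
            ih rest (by omega) (i+1) (0+1) (t-l)]
          congr 1; omega
      · rw [if_neg hlt, if_neg (by omega)]

theorem aLoop_shift (cs : List Char) (i : Nat) (l t : Int) :
    aLoop cs i l t = aLoop cs i 0 (t - l) :=
  aLoop_shift_aux cs.length cs le_rfl i l t

-- On a suffix containing no "\r\n", A's scan is a clamped addition.
theorem aLoop_no_crlf (cs : List Char) (i : Nat) (t : Int) (ht : 0 ≤ t)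
    (h : ¬ (['\r', '\n'] <:+: cs)) :
    aLoop cs i 0 t = min ((i : Int) + t) ((i : Int) + cs.length) := by
  induction cs generalizing i t with
  | nil => simp [aLoop]; omega
  | cons c rest ih =>
    simp only [aLoop]
    by_cases hlt : (0:Int) < t
    · rw [if_pos hlt]
      have hc : ¬ (c = '\r' ∧ rest.head? = some '\n') := by
        rintro ⟨rfl, hh⟩
        rcases rest with _ | ⟨r, rs⟩
        · simp at hh
        · simp at hh; subst hh
          exact h ⟨[], rs, by simp⟩
      rw [if_neg hc, aLoop_shift, show t - (0+1) = t - 1 by ring, ih (i+1) (t-1) (by omega)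
        (fun hinf => h (hinf.trans (List.suffix_cons c rest).isInfix))]
      simp only [List.length_cons]
      push_cast
      omega
    · rw [if_neg hlt]
      simp only [List.length_cons]
      push_cast
      omega

-- Stepping over the first CRLF run: no CRLF starts inside p, the separator follows it.
theorem aLoop_step (p tail : List Char) (i : Nat) (t : Int) (ht : 0 ≤ t)
    (h : ∀ m, m < p.length → ¬ (['\r', '\n'] <+: (p ++ '\r' :: '\n' :: tail).drop m)) :
    aLoop (p ++ '\r' :: '\n' :: tail) i 0 t =
      if t ≤ (p.length : Int) then (i : Int) + t
      else aLoop tail (i + p.length + 2) 0 (t - p.length - 1) := by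
  induction p generalizing i t with
  | nil =>
    simp only [List.nil_append, List.length_nil, Nat.cast_zero]
    by_cases hlt : (0:Int) < t
    · rw [if_neg (by omega)]
      simp only [aLoop, if_pos hlt, List.head?_cons, List.tail_cons]
      simp only [and_self, if_true]
      rw [aLoop_shift]
      norm_num
    · rw [if_pos (by omega)]
      have : t = 0 := by omega
      subst this
      simp only [aLoop, if_neg hlt, add_zero]
  | cons c p' ih =>
    simp only [List.cons_append, List.length_cons]
    by_cases hlt : (0:Int) < t
    · have hc : ¬ (c = '\r' ∧ (p' ++ '\r' :: '\n' :: tail).head? = some '\n') := by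
        rintro ⟨rfl, hh⟩
        rcases hmk : p' ++ '\r' :: '\n' :: tail with _ | ⟨x, xs⟩
        · simp [hmk] at hh
        · rw [hmk] at hh; simp at hh; subst hh
          exact h 0 (by simp) (by simp [hmk])
      simp only [aLoop, if_pos hlt, if_neg hc]
      rw [aLoop_shift, show t - (0+1) = t - 1 by ring,
        ih (i+1) (t-1) (by omega) (fun m hm => by
          have := h (m+1) (by simp only [List.length_cons]; omega)
          simpa using this)]
      push_cast
      split_ifs with h1 h2 h3
      · omega
      · omega
      · omega
      · congr 2
        · omega
        · ring
    · have : t = 0 := by omega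
      subst this
      simp only [aLoop, if_neg hlt]
      rw [if_pos (by positivity)]
      ring

-- A's loop is the identity on an exhausted budget.
theorem aLoop_stop (cs : List Char) (i : Nat) (t : Int) (h : ¬ (0:Int) < t) :
    aLoop cs i 0 t = i := by
  cases cs <;> simp [aLoop, h]

-- Main loop correspondence: A's scan over the unread suffix equals B's find-jumping loop.
theorem loop_eq_aux : ∀ (n : Nat) (cs : List Char) (i : Nat) (t : Int),
    cs.length - i ≤ n → i ≤ cs.length → 0 ≤ t →
    aLoop (cs.drop i) i 0 t = bLoop cs i t := by
  intro n
  induction n with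
  | zero =>
    intro cs i t hn hi ht
    have hieq : i = cs.length := by omega
    rw [bLoop, if_neg (by omega), List.drop_of_length_le (le_of_eq hieq.symm)]
    simp [aLoop]
  | succ n ih =>
    intro cs i t hn hi ht
    rw [bLoop]
    by_cases hg : 0 < t ∧ (i : Int) < cs.length
    · rw [if_pos hg]
      simp only []
      have hk : i ≤ cs.length := hi
      rw [PySem.Chars.findFrom_natCast cs ['\r','\n'] i hk]
      set f := PySem.Chars.find (cs.drop i) ['\r','\n'] with hf
      by_cases hfm : f = -1
      · rw [if_pos (by simp [hfm])]
        have hninf : ¬ (['\r','\n'] <:+: cs.drop i) :=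
          (PySem.Chars.find_eq_neg_one_iff _ _).mp hfm
        rw [aLoop_no_crlf _ _ _ ht hninf]
        congr 1
        rw [List.length_drop]
        omega
      · rw [if_neg hfm]
        have hf0 : 0 ≤ f := by
          have := PySem.Chars.neg_one_le_find (cs.drop i) ['\r','\n']
          rw [← hf] at this; omega
        obtain ⟨hpre, hmin⟩ := PySem.Chars.find_spec (s := cs.drop i) (sub := ['\r','\n']) (by rw [← hf]; exact hf0)
        rw [← hf] at hpre hmin
        set fn := f.toNat with hfn
        have hlen2 : fn + 2 ≤ cs.length - i := by
          have h2 := hpre.length_le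
          simp only [List.length_drop, List.length_cons] at h2
          omega
        obtain ⟨tl, htl⟩ : ∃ tl, (cs.drop i).drop fn = '\r' :: '\n' :: tl := by
          obtain ⟨u, hu⟩ := hpre
          exact ⟨u, by rw [← hu]; rfl⟩
        have hdec : cs.drop i = (cs.drop i).take fn ++ '\r' :: '\n' :: tl := by
          rw [← htl, List.take_append_drop]
        have hplen : ((cs.drop i).take fn).length = fn := by
          rw [List.length_take, List.length_drop]
          omega
        have hstep := aLoop_step ((cs.drop i).take fn) tl i t ht (fun m hm => by
          rw [← hdec]
          exact hmin m (by rw [hplen] at hm; omega))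
        rw [← hdec] at hstep
        rw [hstep, hplen]
        by_cases hb : t ≤ f
        · rw [if_pos (by omega), if_pos (by omega)]
          symm
          omega
        · rw [if_neg (by omega), if_neg (by omega)]
          have htl2 : tl = cs.drop (i + fn + 2) := by
            have h1 : ((cs.drop i).drop fn).drop 2 = cs.drop (i + fn + 2) := by
              rw [List.drop_drop, List.drop_drop,
                show i + (fn + 2) = i + fn + 2 from by omega]
            rw [htl] at h1
            simpa using h1
          have hih := ih cs (i + fn + 2) (t - fn - 1) (by omega) (by omega) (by omega)
          rw [htl2, hih]
          congr 1
          · omega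
          · omega
    · rw [if_neg hg]
      rcases (not_and_or.mp hg) with h1 | h2
      · exact aLoop_stop _ _ _ h1
      · have : cs.length ≤ i := by omega
        rw [List.drop_of_length_le this]
        simp [aLoop]

theorem loop_eq (cs : List Char) (i : Nat) (t : Int) (hi : i ≤ cs.length) (ht : 0 ≤ t) :
    aLoop (cs.drop i) i 0 t = bLoop cs i t :=
  loop_eq_aux (cs.length - i) cs i t le_rfl hi ht

-- ===== VERDICT (by name: the statement is the Claim_ definition above) =====
theorem selection_offset_to_index_py_spec : Claim_equal_selection_offset_to_index_py := by
  intro value offset _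
  unfold Spec_selection_offset_to_index_py
  unfold selection_offset_to_index_py selection_offset_to_index_py_alt
  match offset with
  | none => rfl
  | some off =>
    by_cases hneg : off < 0
    · simp [hneg]
    · simp only [hneg, if_false]
      have ht : 0 ≤ off := le_of_not_gt hneg
      have hmain := loop_eq value.toList 0 off (Nat.zero_le _) ht
      simp only [List.drop_zero] at hmain
      by_cases hin : PySem.Str.isIn "\r\n" value = true
      · simp only [hin, not_true, if_false]
        rw [max_eq_right ht]
        exact hmain
      · simp only [hin]
        rw [if_pos (by simp), ← hmain,
          aLoop_no_crlf _ _ _ ht (fun hinf => hin ((PySem.Str.isIn_iff_infix _ _).mpr (by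
            simpa using hinf)))]
        simp [PySem.Str.len]
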